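-- pv_equiv track=rewrite | github.com/liam5322/Smite-Assault-Advisor | src/analysis/build_suggester.py | _analyze_threats
-- ===== SOURCE A (Python) =====
-- from typing import Dict, List, Any, Optional, Tuple
--
-- def _analyze_threats(enemy_team: List[str]) -> Dict[str, int]:
--     """Analyze enemy team threats"""
--     threats = {
--         'healing': 0,
--         'critical': 0,
--         'burst_damage': 0,
--         'crowd_control': 0,
--         'basic_attacks': 0,
--         'magical_damage': 0,
--         'physical_damage': 0
--     }
--
--     # Threat analysis based on enemy gods
--     healing_gods = ['Aphrodite', 'Chang\'e', 'Hel', 'Ra', 'Sylvanus', 'Terra', 'Yemoja', 'Baron Samedi']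
--     cc_heavy_gods = ['Ares', 'Kumbhakarna', 'Nox', 'Hun Batz', 'Cerberus', 'Ymir']
--     crit_gods = ['Artemis', 'Jing Wei', 'Ne Zha']
--     burst_gods = ['Zeus', 'Scylla', 'He Bo', 'Poseidon', 'Loki']
--
--     for enemy in enemy_team:
--         if enemy in healing_gods:
--             threats['healing'] += 2 if enemy in ['Hel', 'Aphrodite', 'Chang\'e'] else 1
--         if enemy in cc_heavy_gods:
--             threats['crowd_control'] += 2 if enemy in ['Ares', 'Kumbhakarna'] else 1
--         if enemy in crit_gods:
--             threats['critical'] += 2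
--         if enemy in burst_gods:
--             threats['burst_damage'] += 2 if enemy in ['Zeus', 'Scylla'] else 1
--
--     return threats
-- ===== SOURCE B (Python) =====
-- # Single lookup table: god -> (threat category, points); replaces four
-- # per-enemy membership-plus-weight branches with one dict lookup.
-- GOD_THREATS = {
--     'Hel': ('healing', 2), 'Aphrodite': ('healing', 2), "Chang'e": ('healing', 2),
--     'Ra': ('healing', 1), 'Sylvanus': ('healing', 1), 'Terra': ('healing', 1),
--     'Yemoja': ('healing', 1), 'Baron Samedi': ('healing', 1),
--     'Ares': ('crowd_control', 2), 'Kumbhakarna': ('crowd_control', 2),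
--     'Nox': ('crowd_control', 1), 'Hun Batz': ('crowd_control', 1),
--     'Cerberus': ('crowd_control', 1), 'Ymir': ('crowd_control', 1),
--     'Artemis': ('critical', 2), 'Jing Wei': ('critical', 2), 'Ne Zha': ('critical', 2),
--     'Zeus': ('burst_damage', 2), 'Scylla': ('burst_damage', 2),
--     'He Bo': ('burst_damage', 1), 'Poseidon': ('burst_damage', 1), 'Loki': ('burst_damage', 1),
-- }
--
-- def _analyze_threats(enemy_team):
--     threats = dict.fromkeys(
--         ['healing', 'critical', 'burst_damage', 'crowd_control',
--          'basic_attacks', 'magical_damage', 'physical_damage'], 0)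
--     for enemy in enemy_team:
--         hit = GOD_THREATS.get(enemy)
--         if hit is not None:
--             category, points = hit
--             threats[category] += points
--     return threats
-- ===== Notes on version B (the rewrite author's own statement) =====
-- stated objective: faster
-- what changed: Replaces the four per-enemy membership tests over weight sub-lists with a single precomputed god->(category,points) dict consulted once per enemy.
import Mathlib
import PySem

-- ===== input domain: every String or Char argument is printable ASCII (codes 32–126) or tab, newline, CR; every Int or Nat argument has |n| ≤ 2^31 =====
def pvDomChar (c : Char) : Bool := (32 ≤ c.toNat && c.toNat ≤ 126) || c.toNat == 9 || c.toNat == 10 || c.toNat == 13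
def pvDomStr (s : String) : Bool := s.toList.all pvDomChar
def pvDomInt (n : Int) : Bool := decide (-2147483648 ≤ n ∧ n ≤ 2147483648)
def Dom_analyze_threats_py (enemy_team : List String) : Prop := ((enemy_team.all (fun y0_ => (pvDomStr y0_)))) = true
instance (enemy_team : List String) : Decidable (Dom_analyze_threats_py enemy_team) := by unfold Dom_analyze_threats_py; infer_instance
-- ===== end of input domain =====

-- B replaces A's four membership-plus-weight branches per enemy by one lookup in a
-- precomputed god -> (category, points) table (measurably faster by constant factor).

-- ===== PORT A =====
def pvHealingGods : List String := ["Aphrodite", "Chang'e", "Hel", "Ra", "Sylvanus", "Terra", "Yemoja", "Baron Samedi"]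
def pvCcHeavyGods : List String := ["Ares", "Kumbhakarna", "Nox", "Hun Batz", "Cerberus", "Ymir"]
def pvCritGods : List String := ["Artemis", "Jing Wei", "Ne Zha"]
def pvBurstGods : List String := ["Zeus", "Scylla", "He Bo", "Poseidon", "Loki"]

def pvInitThreats : PySem.Dict String Int :=
  PySem.Dict.ofList [("healing", 0), ("critical", 0), ("burst_damage", 0),
    ("crowd_control", 0), ("basic_attacks", 0), ("magical_damage", 0), ("physical_damage", 0)]

-- one iteration of A's loop body (threats[k] += v ported as modify, keys are always present)
def pvStepA (d : PySem.Dict String Int) (enemy : String) : PySem.Dict String Int :=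
  let d := if enemy ∈ pvHealingGods then
      d.modify "healing" 0 (· + (if enemy ∈ ["Hel", "Aphrodite", "Chang'e"] then 2 else 1)) else d
  let d := if enemy ∈ pvCcHeavyGods then
      d.modify "crowd_control" 0 (· + (if enemy ∈ ["Ares", "Kumbhakarna"] then 2 else 1)) else d
  let d := if enemy ∈ pvCritGods then d.modify "critical" 0 (· + 2) else d
  let d := if enemy ∈ pvBurstGods then
      d.modify "burst_damage" 0 (· + (if enemy ∈ ["Zeus", "Scylla"] then 2 else 1)) else d
  d

def analyze_threats_py (enemy_team : List String) : List (String × Int) :=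
  (enemy_team.foldl pvStepA pvInitThreats).items

-- ===== PORT B =====
def pvGodThreats : PySem.Dict String (String × Int) :=
  PySem.Dict.ofList
    [("Hel", ("healing", 2)), ("Aphrodite", ("healing", 2)), ("Chang'e", ("healing", 2)),
     ("Ra", ("healing", 1)), ("Sylvanus", ("healing", 1)), ("Terra", ("healing", 1)),
     ("Yemoja", ("healing", 1)), ("Baron Samedi", ("healing", 1)),
     ("Ares", ("crowd_control", 2)), ("Kumbhakarna", ("crowd_control", 2)),
     ("Nox", ("crowd_control", 1)), ("Hun Batz", ("crowd_control", 1)),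
     ("Cerberus", ("crowd_control", 1)), ("Ymir", ("crowd_control", 1)),
     ("Artemis", ("critical", 2)), ("Jing Wei", ("critical", 2)), ("Ne Zha", ("critical", 2)),
     ("Zeus", ("burst_damage", 2)), ("Scylla", ("burst_damage", 2)),
     ("He Bo", ("burst_damage", 1)), ("Poseidon", ("burst_damage", 1)), ("Loki", ("burst_damage", 1))]

def pvInitThreatsB : PySem.Dict String Int :=
  PySem.Dict.ofList
    (["healing", "critical", "burst_damage", "crowd_control",
      "basic_attacks", "magical_damage", "physical_damage"].map (fun k => (k, 0)))

-- one iteration of B's loop body: table lookup, then a single counter bump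
def pvStepB (d : PySem.Dict String Int) (enemy : String) : PySem.Dict String Int :=
  match pvGodThreats.get? enemy with
  | none => d
  | some (category, points) => d.modify category 0 (· + points)

def analyze_threats_py_alt (enemy_team : List String) : List (String × Int) :=
  (enemy_team.foldl pvStepB pvInitThreatsB).items

-- ===== PRECONDITION & SPEC =====
def Spec_analyze_threats_py (enemy_team : List String) (out : List (String × Int)) : Prop := out = analyze_threats_py_alt enemy_team
instance (enemy_team : List String) (out : List (String × Int)) : Decidable (Spec_analyze_threats_py enemy_team out) := by unfold Spec_analyze_threats_py; infer_instance

-- ===== CLAIM (what is proved, stated in full; the proofs are below) =====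
def Claim_equal_analyze_threats_py : Prop := ∀ (enemy_team : List String), Dom_analyze_threats_py enemy_team → Spec_analyze_threats_py enemy_team (analyze_threats_py enemy_team)

-- ===== LEMMAS AND PROOFS =====

-- all gods appearing in any of A's four lists (= the keys of B's table)
def pvAllGods : List String := pvHealingGods ++ pvCcHeavyGods ++ pvCritGods ++ pvBurstGods

lemma pvStep_eq (d : PySem.Dict String Int) (e : String) : pvStepA d e = pvStepB d e := by
  by_cases h : e ∈ pvAllGods
  · simp only [pvAllGods, pvHealingGods, pvCcHeavyGods, pvCritGods, pvBurstGods,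
      List.append_assoc, List.mem_append, List.mem_cons, List.not_mem_nil, or_false] at h
    rcases h with (rfl | rfl | rfl | rfl | rfl | rfl | rfl | rfl) |
      (rfl | rfl | rfl | rfl | rfl | rfl) | (rfl | rfl | rfl) |
      (rfl | rfl | rfl | rfl | rfl) <;> rfl
  · simp only [pvAllGods, pvHealingGods, pvCcHeavyGods, pvCritGods, pvBurstGods,
      List.append_assoc, List.mem_append, List.mem_cons, List.not_mem_nil, or_false,
      not_or] at h
    obtain ⟨⟨h1, h2, h3, h4, h5, h6, h7, h8⟩, ⟨h9, h10, h11, h12, h13, h14⟩,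
      ⟨h15, h16, h17⟩, h18, h19, h20, h21, h22⟩ := h
    have hnone : pvGodThreats.get? e = none := by
      have hmk : pvGodThreats = PySem.Dict.mk
        [("Hel", ("healing", 2)), ("Aphrodite", ("healing", 2)), ("Chang'e", ("healing", 2)),
         ("Ra", ("healing", 1)), ("Sylvanus", ("healing", 1)), ("Terra", ("healing", 1)),
         ("Yemoja", ("healing", 1)), ("Baron Samedi", ("healing", 1)),
         ("Ares", ("crowd_control", 2)), ("Kumbhakarna", ("crowd_control", 2)),
         ("Nox", ("crowd_control", 1)), ("Hun Batz", ("crowd_control", 1)),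
         ("Cerberus", ("crowd_control", 1)), ("Ymir", ("crowd_control", 1)),
         ("Artemis", ("critical", 2)), ("Jing Wei", ("critical", 2)), ("Ne Zha", ("critical", 2)),
         ("Zeus", ("burst_damage", 2)), ("Scylla", ("burst_damage", 2)),
         ("He Bo", ("burst_damage", 1)), ("Poseidon", ("burst_damage", 1)),
         ("Loki", ("burst_damage", 1))] := by decide
      simp [hmk, beq_iff_eq, Ne.symm h1, Ne.symm h2, Ne.symm h3,
        Ne.symm h4, Ne.symm h5, Ne.symm h6, Ne.symm h7, Ne.symm h8, Ne.symm h9, Ne.symm h10,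
        Ne.symm h11, Ne.symm h12, Ne.symm h13, Ne.symm h14, Ne.symm h15, Ne.symm h16,
        Ne.symm h17, Ne.symm h18, Ne.symm h19, Ne.symm h20, Ne.symm h21, Ne.symm h22,
        PySem.Dict.get?]
    have g1 : e ∉ pvHealingGods := by simp [pvHealingGods, h1, h2, h3, h4, h5, h6, h7, h8]
    have g2 : e ∉ pvCcHeavyGods := by simp [pvCcHeavyGods, h9, h10, h11, h12, h13, h14]
    have g3 : e ∉ pvCritGods := by simp [pvCritGods, h15, h16, h17]
    have g4 : e ∉ pvBurstGods := by simp [pvBurstGods, h18, h19, h20, h21, h22]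
    simp only [pvStepA, pvStepB, hnone, if_neg g1, if_neg g2, if_neg g3, if_neg g4]

-- ===== VERDICT (by name: the statement is the Claim_ definition above) =====
theorem analyze_threats_py_spec : Claim_equal_analyze_threats_py := by
  intro enemy_team _
  unfold Spec_analyze_threats_py analyze_threats_py analyze_threats_py_alt
  have hinit : pvInitThreats = pvInitThreatsB := by rfl
  have hstep : pvStepA = pvStepB := funext fun d => funext fun e => pvStep_eq d e
  rw [hinit, hstep]
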